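-- pv_equiv track=rewrite | github.com/Josuearv/UTN_Trabajos_Practicos | parcial2/src/utils.py | vertical_search_gen
-- ===== SOURCE A (Python) =====
-- gens_mutan = ["A"*4, "T"*4, "C"*4, "G"*4]
--
-- def vertical_search_gen(adn):
--     count = 0
--     for i in range(6):
--         column = ''
--         for j in adn:
--             # Construye la columna concatenando los elementos en la posición i
--             column += j[i]
--         # Comprueba si alguna secuencia mutante está presente en la columna
--         for gen in gens_mutan:
--             if gen in column:
--                 count += 1
--     return count
-- ===== SOURCE B (Python) =====
-- def vertical_search_gen(adn):
--     count = 0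
--     for i in range(6):
--         prev = None
--         run = 0
--         seen = set()
--         for row in adn:
--             ch = row[i]
--             if ch == prev:
--                 run += 1
--             else:
--                 prev = ch
--                 run = 1
--             if run >= 4 and ch in "ATCG" and ch not in seen:
--                 seen.add(ch)
--                 count += 1
--     return count
-- ===== Notes on version B (the rewrite author's own statement) =====
-- stated objective: alternative
-- what changed: Instead of building each column string and running four substring searches, B makes one run-length pass down each column, counting a nucleotide when its consecutive run reaches 4 and a per-column seen-set prevents double counting.
import Mathlib
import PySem

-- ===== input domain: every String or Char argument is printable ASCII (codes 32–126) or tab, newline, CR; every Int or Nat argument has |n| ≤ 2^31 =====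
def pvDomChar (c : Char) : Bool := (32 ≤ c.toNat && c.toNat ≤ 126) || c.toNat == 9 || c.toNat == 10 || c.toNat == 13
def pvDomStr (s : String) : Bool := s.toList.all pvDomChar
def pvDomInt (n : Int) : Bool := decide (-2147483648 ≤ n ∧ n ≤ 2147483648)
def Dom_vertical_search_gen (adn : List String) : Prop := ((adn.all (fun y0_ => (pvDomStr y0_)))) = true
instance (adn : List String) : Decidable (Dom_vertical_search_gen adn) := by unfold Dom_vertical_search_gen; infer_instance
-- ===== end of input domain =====

-- B replaces A's per-column string building plus four substring searches by a single run-length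
-- pass down each column with a per-column seen-set (an alternative, structurally different algorithm).

-- ===== PORT A =====
def gens_mutan : List (List Char) :=
  [List.replicate 4 'A', List.replicate 4 'T', List.replicate 4 'C', List.replicate 4 'G']

def vertical_search_gen (adn : List String) : Int :=
  (PySem.List.pyRange 0 6 1).foldl (fun count i =>
    let column := adn.foldl (fun col j => col ++ [PySem.List.pyGetD j.toList i ' ']) ([] : List Char)
    gens_mutan.foldl (fun c gen => if PySem.Chars.isIn gen column then c + 1 else c) count) 0

-- ===== PORT B =====
def vertical_search_gen_alt (adn : List String) : Int :=
  (PySem.List.pyRange 0 6 1).foldl (fun count i =>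
    (adn.foldl (fun (st : Option Char × Int × PySem.Set Char × Int) row =>
        let ch := PySem.List.pyGetD row.toList i ' '
        let run : Int := if some ch = st.1 then st.2.1 + 1 else 1
        if 4 ≤ run ∧ ch ∈ (['A', 'T', 'C', 'G'] : List Char) ∧ ¬ PySem.Set.contains st.2.2.1 ch = true then
          (some ch, run, PySem.Set.add st.2.2.1 ch, st.2.2.2 + 1)
        else
          (some ch, run, st.2.2.1, st.2.2.2))
      (none, 0, PySem.Set.empty, count)).2.2.2) 0

-- ===== PRECONDITION & SPEC =====
-- Pre_ excludes exactly the inputs on which the Python A raises IndexError: a row shorter than 6 characters.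
def Pre_vertical_search_gen (adn : List String) : Prop := ∀ s ∈ adn, 6 ≤ s.toList.length
instance (adn : List String) : Decidable (Pre_vertical_search_gen adn) := by
  unfold Pre_vertical_search_gen; infer_instance

def pvWitness_vertical_search_gen : List String := ["AAAAAT", "ATCGGG", "AACCTG", "AGGCTA"]

def Spec_vertical_search_gen (adn : List String) (out : Int) : Prop := out = vertical_search_gen_alt adn
instance (adn : List String) (out : Int) : Decidable (Spec_vertical_search_gen adn out) := by
  unfold Spec_vertical_search_gen; infer_instance

-- ===== CLAIM (what is proved, stated in full; the proofs are below) =====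
def Claim_equal_vertical_search_gen : Prop := ∀ (adn : List String), Dom_vertical_search_gen adn → Pre_vertical_search_gen adn → Spec_vertical_search_gen adn (vertical_search_gen adn)

-- ===== LEMMAS AND PROOFS =====

def rep4 (c : Char) : List Char := List.replicate 4 c
def leadRun : List Char → Nat
  | [] => 0
  | a :: t => if t.head? = some a then leadRun t + 1 else 1

theorem prefix_replicate_iff (l : List Char) (c : Char) (n : Nat) (hn : 0 < n) :
    List.replicate n c <+: l ↔ l.head? = some c ∧ n ≤ leadRun l := by
  induction l generalizing n with
  | nil =>
    simp only [List.prefix_nil, List.replicate_eq_nil_iff, List.head?_nil]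
    constructor
    · intro h; omega
    · intro h; exact absurd h.1 (by simp)
  | cons a t ih =>
    obtain ⟨m, rfl⟩ : ∃ m, n = m + 1 := ⟨n - 1, by omega⟩
    rw [List.replicate_succ, List.cons_prefix_cons]
    simp only [List.head?_cons, Option.some_inj, leadRun]
    rcases Nat.eq_zero_or_pos m with hm | hm
    · subst hm
      simp only [List.replicate_zero, List.nil_prefix, and_true]
      constructor
      · rintro rfl; exact ⟨rfl, by split <;> omega⟩
      · rintro ⟨rfl, _⟩; rfl
    · rw [ih m hm]
      constructor
      · rintro ⟨rfl, hh, hle⟩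
        refine ⟨rfl, ?_⟩
        rw [hh, if_pos rfl]
        omega
      · rintro ⟨rfl, hle⟩
        by_cases hh : t.head? = some a
        · rw [if_pos hh] at hle
          exact ⟨rfl, hh, by omega⟩
        · rw [if_neg hh] at hle; omega

theorem infix_cons_run (c x : Char) (r : List Char) :
    rep4 c <:+: (x :: r) ↔ rep4 c <:+: r ∨ (x = c ∧ 4 ≤ leadRun (x :: r)) := by
  rw [List.infix_cons_iff, rep4, prefix_replicate_iff _ _ _ (by omega)]
  simp only [List.head?_cons, Option.some_inj]
  tauto

theorem infix_cons_of_infix (c x : Char) (r : List Char) (h : rep4 c <:+: r) :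
    rep4 c <:+: (x :: r) := by
  rw [infix_cons_run]; exact Or.inl h

theorem inc1 (c x : Char) (r : List Char) :
    (if rep4 c <:+: (x :: r) then (1 : Int) else 0) =
      (if rep4 c <:+: r then (1 : Int) else 0) +
      (if c = x ∧ rep4 x <:+: (x :: r) ∧ ¬ rep4 x <:+: r then 1 else 0) := by
  by_cases hcx : c = x
  · subst hcx
    simp only [infix_cons_run, true_and]
    split_ifs <;> first | omega | tauto
  · have hxc : ¬ x = c := fun h => hcx h.symm
    simp only [infix_cons_run]
    split_ifs <;> first | omega | tauto

def nucs : List Char := ['A', 'T', 'C', 'G']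
def cntR (r : List Char) : Int :=
  (if rep4 'A' <:+: r then (1 : Int) else 0) + (if rep4 'T' <:+: r then 1 else 0) +
  (if rep4 'C' <:+: r then 1 else 0) + (if rep4 'G' <:+: r then 1 else 0)

theorem cntR_cons (x : Char) (r : List Char) :
    cntR (x :: r) =
      cntR r + (if x ∈ nucs ∧ rep4 x <:+: (x :: r) ∧ ¬ rep4 x <:+: r then 1 else 0) := by
  unfold cntR
  rw [inc1 'A' x r, inc1 'T' x r, inc1 'C' x r, inc1 'G' x r]
  by_cases hE : rep4 x <:+: (x :: r) ∧ ¬ rep4 x <:+: r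
  · by_cases hx : x ∈ nucs
    · have h1 : ∀ c : Char, (if c = x ∧ rep4 x <:+: (x :: r) ∧ ¬ rep4 x <:+: r then (1:Int) else 0)
          = (if c = x then 1 else 0) := by
        intro c
        by_cases h : c = x
        · rw [if_pos (show c = x ∧ rep4 x <:+: (x :: r) ∧ ¬ rep4 x <:+: r from ⟨h, hE⟩), if_pos h]
        · rw [if_neg (by rintro ⟨hh, -, -⟩; exact h hh), if_neg h]
      rw [h1, h1, h1, h1, if_pos (show x ∈ nucs ∧ rep4 x <:+: (x :: r) ∧ ¬ rep4 x <:+: r from ⟨hx, hE⟩)]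
      have hsum : (if ('A':Char) = x then (1:Int) else 0) + (if ('T':Char) = x then (1:Int) else 0)
          + (if ('C':Char) = x then (1:Int) else 0) + (if ('G':Char) = x then (1:Int) else 0) = 1 := by
        fin_cases hx <;> decide
      linarith [hsum]
    · have h1 : ∀ c : Char, c ∈ nucs →
          (if c = x ∧ rep4 x <:+: (x :: r) ∧ ¬ rep4 x <:+: r then (1:Int) else 0) = 0 := by
        intro c hc
        exact if_neg (show ¬(c = x ∧ rep4 x <:+: (x :: r) ∧ ¬ rep4 x <:+: r) from
          fun h => hx (h.1 ▸ hc))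
      rw [h1 'A' (by decide), h1 'T' (by decide), h1 'C' (by decide), h1 'G' (by decide),
          if_neg (show ¬(x ∈ nucs ∧ rep4 x <:+: (x :: r) ∧ ¬ rep4 x <:+: r) from fun h => hx h.1)]
      ring
  · have h1 : ∀ c : Char,
        (if c = x ∧ rep4 x <:+: (x :: r) ∧ ¬ rep4 x <:+: r then (1:Int) else 0) = 0 := by
      intro c
      exact if_neg (show ¬(c = x ∧ rep4 x <:+: (x :: r) ∧ ¬ rep4 x <:+: r) from
        fun h => hE ⟨h.2.1, h.2.2⟩)
    rw [h1, h1, h1, h1,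
      if_neg (show ¬(x ∈ nucs ∧ rep4 x <:+: (x :: r) ∧ ¬ rep4 x <:+: r) from fun h => hE ⟨h.2.1, h.2.2⟩)]
    ring

def bstep (st : Option Char × Int × PySem.Set Char × Int) (ch : Char) :
    Option Char × Int × PySem.Set Char × Int :=
  let run : Int := if some ch = st.1 then st.2.1 + 1 else 1
  if 4 ≤ run ∧ ch ∈ nucs ∧ ¬ PySem.Set.contains st.2.2.1 ch = true then
    (some ch, run, PySem.Set.add st.2.2.1 ch, st.2.2.2 + 1)
  else
    (some ch, run, st.2.2.1, st.2.2.2)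

theorem main_loop (l : List Char) :
    ∀ (r seen : List Char) (cnt0 : Int),
    (∀ c, c ∈ seen ↔ c ∈ nucs ∧ rep4 c <:+: r) →
    (l.foldl bstep (r.head?, (leadRun r : Int), seen, cnt0 + cntR r)).2.2.2 =
      cnt0 + cntR (l.reverse ++ r) := by
  induction l with
  | nil => intro r seen cnt0 _; simp
  | cons x l ih =>
    intro r seen cnt0 hseen
    have hmem : PySem.Set.contains seen x = true ↔ x ∈ seen := by
      simp [PySem.Set.contains]
    have hlr : leadRun (x :: r) = if r.head? = some x then leadRun r + 1 else 1 := rfl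
    have hrun : (if some x = r.head? then (leadRun r : Int) + 1 else 1) = (leadRun (x :: r) : Int) := by
      rw [hlr]
      by_cases h : r.head? = some x
      · rw [if_pos h.symm, if_pos h]; push_cast; ring
      · rw [if_neg (fun hh => h hh.symm), if_neg h]; norm_num
    have hcond : (4 ≤ (leadRun (x :: r) : Int) ∧ x ∈ nucs ∧ ¬ PySem.Set.contains seen x = true) ↔
        (x ∈ nucs ∧ rep4 x <:+: (x :: r) ∧ ¬ rep4 x <:+: r) := by
      constructor
      · rintro ⟨h4, hn, hns⟩
        have hnr : ¬ rep4 x <:+: r := fun h => hns (hmem.mpr ((hseen x).mpr ⟨hn, h⟩))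
        exact ⟨hn, (infix_cons_run x x r).mpr (Or.inr ⟨rfl, by exact_mod_cast h4⟩), hnr⟩
      · rintro ⟨hn, hx, hnr⟩
        rcases (infix_cons_run x x r).mp hx with h | h
        · exact absurd h hnr
        · exact ⟨by exact_mod_cast h.2, hn, fun hc => hnr (((hseen x).mp (hmem.mp hc)).2)⟩
    rw [List.foldl_cons]
    have hstep : bstep (r.head?, (leadRun r : Int), seen, cnt0 + cntR r) x =
        (if 4 ≤ (leadRun (x :: r) : Int) ∧ x ∈ nucs ∧ ¬ PySem.Set.contains seen x = true then
          ((x :: r).head?, (leadRun (x :: r) : Int), PySem.Set.add seen x, cnt0 + cntR r + 1)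
        else ((x :: r).head?, (leadRun (x :: r) : Int), seen, cnt0 + cntR r)) := by
      unfold bstep
      rw [show (if some x = (r.head? : Option Char) then (leadRun r : Int) + 1 else 1) = (leadRun (x :: r) : Int) from hrun]
      rfl
    rw [hstep]
    by_cases hc : 4 ≤ (leadRun (x :: r) : Int) ∧ x ∈ nucs ∧ ¬ PySem.Set.contains seen x = true
    · rw [if_pos hc]
      have hc' := hcond.mp hc
      have hcnt : cnt0 + cntR r + 1 = cnt0 + cntR (x :: r) := by
        rw [cntR_cons, if_pos hc']; ring
      have hseen' : ∀ c, c ∈ PySem.Set.add seen x ↔ c ∈ nucs ∧ rep4 c <:+: (x :: r) := by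
        intro c
        rw [PySem.Set.mem_add]
        constructor
        · rintro (h | rfl)
          · have := (hseen c).mp h
            exact ⟨this.1, infix_cons_of_infix c x r this.2⟩
          · exact ⟨hc'.1, hc'.2.1⟩
        · rintro ⟨hn, hxx⟩
          by_cases hcx : c = x
          · exact Or.inr hcx
          · rcases (infix_cons_run c x r).mp hxx with h | h
            · exact Or.inl ((hseen c).mpr ⟨hn, h⟩)
            · exact absurd h.1.symm hcx
      rw [hcnt]
      have := ih (x :: r) (PySem.Set.add seen x) cnt0 hseen'
      rw [this]
      simp
    · rw [if_neg hc]
      have hc' : ¬ (x ∈ nucs ∧ rep4 x <:+: (x :: r) ∧ ¬ rep4 x <:+: r) := fun h => hc (hcond.mpr h)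
      have hcnt : cnt0 + cntR r = cnt0 + cntR (x :: r) := by
        rw [cntR_cons, if_neg hc']; ring
      have hseen' : ∀ c, c ∈ seen ↔ c ∈ nucs ∧ rep4 c <:+: (x :: r) := by
        intro c
        rw [hseen c]
        constructor
        · rintro ⟨hn, h⟩; exact ⟨hn, infix_cons_of_infix c x r h⟩
        · rintro ⟨hn, hxx⟩
          by_cases hcx : c = x
          · subst hcx
            by_cases hr : rep4 c <:+: r
            · exact ⟨hn, hr⟩
            · exact absurd (hcond.mpr ⟨hn, hxx, hr⟩) hc
          · rcases (infix_cons_run c x r).mp hxx with h | h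
            · exact ⟨hn, h⟩
            · exact absurd h.1.symm hcx
      rw [hcnt]
      rw [ih (x :: r) seen cnt0 hseen']
      simp

theorem infix_rev (c : Char) (col : List Char) : rep4 c <:+: col.reverse ↔ rep4 c <:+: col := by
  have hrr : (rep4 c).reverse = rep4 c := by simp [rep4]
  conv_lhs => rw [← hrr]
  rw [List.reverse_infix]

theorem acol (col : List Char) (count : Int) :
    gens_mutan.foldl (fun c gen => if PySem.Chars.isIn gen col then c + 1 else c) count =
      count + cntR col.reverse := by
  have h : ∀ c : Char, (PySem.Chars.isIn (List.replicate 4 c) col = true) ↔ rep4 c <:+: col.reverse := by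
    intro c
    rw [PySem.Chars.isIn_iff_infix, infix_rev]
    exact Iff.rfl
  simp only [gens_mutan, List.foldl_cons, List.foldl_nil]
  unfold cntR
  simp only [h]
  split_ifs <;> ring

theorem cntR_nil : cntR [] = 0 := by
  unfold cntR rep4
  simp

theorem column_eq (adn : List String) (count i : Int) :
    (let column := adn.foldl (fun col j => col ++ [PySem.List.pyGetD j.toList i ' ']) ([] : List Char)
     gens_mutan.foldl (fun c gen => if PySem.Chars.isIn gen column then c + 1 else c) count) =
    (adn.foldl (fun (st : Option Char × Int × PySem.Set Char × Int) row =>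
        let ch := PySem.List.pyGetD row.toList i ' '
        let run : Int := if some ch = st.1 then st.2.1 + 1 else 1
        if 4 ≤ run ∧ ch ∈ (['A', 'T', 'C', 'G'] : List Char) ∧ ¬ PySem.Set.contains st.2.2.1 ch = true then
          (some ch, run, PySem.Set.add st.2.2.1 ch, st.2.2.2 + 1)
        else
          (some ch, run, st.2.2.1, st.2.2.2))
      (none, 0, PySem.Set.empty, count)).2.2.2 := by
  have hB : (adn.foldl (fun (st : Option Char × Int × PySem.Set Char × Int) row =>
        let ch := PySem.List.pyGetD row.toList i ' '
        let run : Int := if some ch = st.1 then st.2.1 + 1 else 1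
        if 4 ≤ run ∧ ch ∈ (['A', 'T', 'C', 'G'] : List Char) ∧ ¬ PySem.Set.contains st.2.2.1 ch = true then
          (some ch, run, PySem.Set.add st.2.2.1 ch, st.2.2.2 + 1)
        else
          (some ch, run, st.2.2.1, st.2.2.2))
      (none, 0, PySem.Set.empty, count)) =
      ((adn.map (fun j => PySem.List.pyGetD j.toList i ' ')).foldl bstep
        (none, 0, PySem.Set.empty, count)) := by
    rw [List.foldl_map]
    rfl
  show gens_mutan.foldl _ _ = _
  have hm := main_loop (adn.map (fun j => PySem.List.pyGetD j.toList i ' ')) [] [] count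
    (by intro c; simp [rep4])
  rw [hB, PySem.List.foldl_append_singleton_eq_map, List.nil_append, acol]
  rw [show ((none : Option Char), (0 : Int), (PySem.Set.empty : PySem.Set Char), count) =
      (([] : List Char).head?, (leadRun [] : Int), ([] : List Char), count + cntR []) from by
    simp [cntR_nil, PySem.Set.empty, leadRun]]
  rw [hm]
  simp

-- ===== VERDICT (by name: the statement is the Claim_ definition above) =====
theorem vertical_search_gen_spec : Claim_equal_vertical_search_gen := by
  intro adn _ _
  unfold Spec_vertical_search_gen vertical_search_gen vertical_search_gen_alt
  exact PySem.List.foldl_congr_mem _ _ _ _ (fun count i _ => column_eq adn count i)
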